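-- pv_equiv track=rewrite | github.com/ve-i-uj/leetcode | leetcode/pyleetcode/pyleetcode/easy/binary_tree_postorder_traversal.py | normalize_vals
-- ===== SOURCE A (Python) =====
-- from typing import Optional, List
--
-- def normalize_vals(vals: list[Optional[int]]) -> list[Optional[int]]:
--     i = 0
--     if not vals or vals[i] is None:
--         return []
--
--     res = vals[:]
--     stack = []
--     while i < len(vals):
--         if vals[i] is None:
--             i1 = 2 * i + 1
--             i2 = 2 * i + 2
--             if i1 < len(res):
--                 res.insert(i1, None)
--             if i2 < len(res):
--                 res.insert(i2, None)
--         i += 1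
--
--     return res
-- ===== SOURCE B (Python) =====
-- from typing import Optional, List
--
-- def normalize_vals(vals: list[Optional[int]]) -> list[Optional[int]]:
--     if not vals or vals[0] is None:
--         return []
--     n = len(vals)
--     out = []
--     s = 0      # next original element to copy
--     ins = 0    # number of Nones inserted so far
--     for i in range(n):
--         if vals[i] is None:
--             for q in (2 * i + 1, 2 * i + 2):
--                 if q < n + ins:
--                     while len(out) < q:
--                         out.append(vals[s])
--                         s += 1
--                     out.append(None)
--                     ins += 1
--     out.extend(vals[s:])
--     return out
-- ===== Notes on version B (the rewrite author's own statement) =====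
-- stated objective: faster
-- what changed: A repeatedly calls list.insert in the middle of a growing list (each insert shifts the whole tail); B exploits that the insert positions 2i+1, 2i+2 are strictly increasing and builds the result in one forward pass, copying each original element once and emitting the inserted Nones at their target positions with a running insertion counter.
import Mathlib
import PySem

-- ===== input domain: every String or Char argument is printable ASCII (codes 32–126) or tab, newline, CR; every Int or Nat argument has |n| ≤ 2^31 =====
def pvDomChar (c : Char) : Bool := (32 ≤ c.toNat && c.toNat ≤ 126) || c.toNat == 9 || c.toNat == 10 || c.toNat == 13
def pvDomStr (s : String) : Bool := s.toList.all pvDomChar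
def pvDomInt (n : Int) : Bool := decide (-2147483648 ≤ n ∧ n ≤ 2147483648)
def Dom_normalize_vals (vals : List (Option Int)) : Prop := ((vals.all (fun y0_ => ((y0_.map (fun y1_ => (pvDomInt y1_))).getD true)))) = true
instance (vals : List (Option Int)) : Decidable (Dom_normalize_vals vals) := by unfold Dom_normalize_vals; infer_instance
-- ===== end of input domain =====

-- B replaces A's repeated mid-list list.insert calls (quadratic) by a single forward pass
-- that copies the original elements once and emits the inserted Nones at their (monotonically
-- increasing) target positions, tracking a running insertion count.

-- ===== PORT A =====
-- body of A's while-loop for one index i (two conditional mid-list inserts)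
def stepA (vals : List (Option Int)) (res : List (Option Int)) (i : Int) : List (Option Int) :=
  if PySem.List.pyGetD vals i (some 0) = none then
    let i1 : Int := 2 * i + 1
    let i2 : Int := 2 * i + 2
    let res1 := if i1 < (res.length : Int) then PySem.List.insert res i1 none else res
    let res2 := if i2 < (res1.length : Int) then PySem.List.insert res1 i2 none else res1
    res2
  else res

def normalize_vals (vals : List (Option Int)) : List (Option Int) :=
  if vals = [] ∨ PySem.List.pyGetD vals 0 (some 0) = none then []
  else (PySem.List.pyRange 0 (vals.length : Int) 1).foldl (stepA vals) vals

-- ===== PORT B =====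
-- B's inner while-loop: copy original elements vals[s], vals[s+1], … until out has length q
def fillB (vals : List (Option Int)) (q : Nat) (out : List (Option Int)) (s : Nat) :
    List (Option Int) × Nat :=
  if out.length < q then
    fillB vals q (out ++ [PySem.List.pyGetD vals (s : Int) none]) (s + 1)
  else (out, s)
termination_by q - out.length
decreasing_by simp; omega

-- B's per-position step: state (out, s, ins); emit a None at target position q if in range
def stepB (vals : List (Option Int)) (n : Nat) (st : List (Option Int) × Nat × Nat) (q : Nat) :
    List (Option Int) × Nat × Nat :=
  if q < n + st.2.2 then
    let fs := fillB vals q st.1 st.2.1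
    (fs.1 ++ [none], fs.2, st.2.2 + 1)
  else st

-- B's outer for-loop body for index i
def stepOuterB (vals : List (Option Int)) (st : List (Option Int) × Nat × Nat) (i : Nat) :
    List (Option Int) × Nat × Nat :=
  if PySem.List.pyGetD vals (i : Int) (some 0) = none then
    [2 * i + 1, 2 * i + 2].foldl (stepB vals vals.length) st
  else st

def normalize_vals_alt (vals : List (Option Int)) : List (Option Int) :=
  if vals = [] ∨ PySem.List.pyGetD vals 0 (some 0) = none then []
  else
    let st := (List.range vals.length).foldl (stepOuterB vals) ([], 0, 0)
    st.1 ++ vals.drop st.2.1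

-- ===== PRECONDITION & SPEC =====
def Spec_normalize_vals (vals : List (Option Int)) (out : List (Option Int)) : Prop := out = normalize_vals_alt vals
instance (vals : List (Option Int)) (out : List (Option Int)) : Decidable (Spec_normalize_vals vals out) := by unfold Spec_normalize_vals; infer_instance

-- ===== CLAIM (what is proved, stated in full; the proofs are below) =====
def Claim_equal_normalize_vals : Prop := ∀ (vals : List (Option Int)), Dom_normalize_vals vals → Spec_normalize_vals vals (normalize_vals vals)

-- ===== LEMMAS AND PROOFS =====

-- Invariant tying A's list `res` to B's state (out, s, ins) before processing index i
def InvAB (vals out : List (Option Int)) (s ins i : Nat) (res : List (Option Int)) : Prop :=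
  res = out ++ vals.drop s ∧ out.length = s + ins ∧ s ≤ vals.length ∧ out.length ≤ 2 * i + 1

lemma fillB_spec (vals : List (Option Int)) (q : Nat) :
    ∀ (d out : _) (s : Nat), q - out.length = d → out.length ≤ q →
      q ≤ out.length + (vals.length - s) →
      fillB vals q out s = (out ++ (vals.drop s).take d, s + d) := by
  intro d
  induction d with
  | zero =>
    intro out s hd hle _
    rw [fillB]
    simp only [if_neg (by omega : ¬ out.length < q)]
    simp
  | succ d ih =>
    intro out s hd hle hroom
    have hlt : out.length < q := by omega
    have hs : s < vals.length := by omega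
    rw [fillB, if_pos hlt]
    rw [ih (out ++ [PySem.List.pyGetD vals (s : Int) none]) (s + 1)
        (by simp; omega) (by simp; omega) (by simp; omega)]
    have hget : PySem.List.pyGetD vals (s : Int) none = vals[s] := by
      rw [PySem.List.pyGetD_natCast]
      simp [List.getD_eq_getElem?_getD, hs]
    have hdrop : vals.drop s = vals[s] :: vals.drop (s + 1) := (List.getElem_cons_drop hs).symm
    rw [hget, hdrop]
    refine congrArg₂ Prod.mk ?_ (by omega)
    rw [List.take_succ_cons, List.append_assoc]
    rfl

-- one in-range insert of A corresponds to one stepB emission of B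
lemma insert_spec (vals out : List (Option Int)) (s ins q : Nat)
    (hl : out.length = s + ins) (hs : s ≤ vals.length) (hoq : out.length ≤ q)
    (hg : q < vals.length + ins) :
    PySem.List.insert (out ++ vals.drop s) (q : Int) none
      = ((fillB vals q out s).1 ++ [none]) ++ vals.drop (fillB vals q out s).2
    ∧ (fillB vals q out s).1.length = q
    ∧ (fillB vals q out s).2 = q - ins := by
  have hld : (vals.drop s).length = vals.length - s := List.length_drop
  have hlen : (out ++ vals.drop s).length = vals.length + ins := by
    rw [List.length_append, hld]; omega
  have hfill := fillB_spec vals q (q - out.length) out s rfl hoq (by omega)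
  rw [hfill]
  refine ⟨?_, ?_, ?_⟩
  · rw [PySem.List.insert_natCast _ _ _ (by omega)]
    rw [List.take_append, List.drop_append]
    rw [List.take_of_length_le hoq, List.drop_eq_nil_of_le hoq]
    have hdd : (vals.drop s).drop (q - out.length) = vals.drop (s + (q - out.length)) := by
      rw [List.drop_drop]
    rw [hdd]
    simp [List.append_assoc]
  · rw [List.length_append, List.length_take, hld]; omega
  · omega

-- one loop iteration: InvAB is preserved and A's step equals B's step
lemma stepB_pos (vals : List (Option Int)) (n : Nat) (out : List (Option Int)) (s ins q : Nat)
    (h : q < n + ins) :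
    stepB vals n (out, s, ins) q
      = ((fillB vals q out s).1 ++ [none], (fillB vals q out s).2, ins + 1) := by
  simp [stepB, h]

lemma stepB_neg (vals : List (Option Int)) (n : Nat) (out : List (Option Int)) (s ins q : Nat)
    (h : ¬ q < n + ins) : stepB vals n (out, s, ins) q = (out, s, ins) := by
  simp [stepB, h]

lemma step_spec (vals out : List (Option Int)) (s ins i : Nat) (res : List (Option Int))
    (hInv : InvAB vals out s ins i res) :
    InvAB vals (stepOuterB vals (out, s, ins) i).1 (stepOuterB vals (out, s, ins) i).2.1
      (stepOuterB vals (out, s, ins) i).2.2 (i + 1) (stepA vals res (i : Int)) := by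
  obtain ⟨hres, hl, hs, hb⟩ := hInv
  have hreslen : res.length = vals.length + ins := by
    subst hres; simp [List.length_drop]; omega
  unfold stepA stepOuterB
  by_cases hv : PySem.List.pyGetD vals (i : Int) (some 0) = none
  · rw [if_pos hv, if_pos hv]
    simp only [List.foldl_cons, List.foldl_nil]
    set q1 : Nat := 2 * i + 1 with hq1def
    set q2 : Nat := 2 * i + 2 with hq2def
    have hcast1 : (2 * (i : Int) + 1) = ((q1 : Nat) : Int) := by rw [hq1def]; push_cast; ring
    have hcast2 : (2 * (i : Int) + 2) = ((q2 : Nat) : Int) := by rw [hq2def]; push_cast; ring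
    by_cases hg1 : q1 < vals.length + ins
    · -- A's first guard true ↔ B's first guard true
      have hA1 : (2 * (i:Int) + 1) < (res.length : Int) := by
        rw [hreslen]; push_cast; omega
      rw [if_pos hA1]
      rw [stepB_pos vals vals.length out s ins q1 hg1]
      have hoq1 : out.length ≤ q1 := by omega
      obtain ⟨he1, hlen1, hs1⟩ := insert_spec vals out s ins q1 hl hs hoq1 hg1
      rw [hres, hcast1, he1]
      set out1 := (fillB vals q1 out s).1 ++ [none] with hout1
      set s1 := (fillB vals q1 out s).2 with hs1def
      have hlout1 : out1.length = q1 + 1 := by simp [hout1, hlen1]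
      have hs1le : s1 ≤ vals.length := by omega
      have hl1 : out1.length = s1 + (ins + 1) := by omega
      have hres1len : (out1 ++ vals.drop s1).length = vals.length + (ins + 1) := by
        simp [List.length_drop]; omega
      by_cases hg2 : q2 < vals.length + (ins + 1)
      · have hA2 : (2 * (i:Int) + 2) < ((out1 ++ vals.drop s1).length : Int) := by
          rw [hres1len]; push_cast; omega
        rw [if_pos hA2]
        rw [stepB_pos vals vals.length out1 s1 (ins + 1) q2 hg2]
        have hoq2 : out1.length ≤ q2 := by omega
        obtain ⟨he2, hlen2, hs2⟩ := insert_spec vals out1 s1 (ins + 1) q2 hl1 hs1le hoq2 hg2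
        rw [hcast2, he2]
        refine ⟨rfl, ?_, ?_, ?_⟩
        · show ((fillB vals q2 out1 s1).1 ++ [none]).length = (fillB vals q2 out1 s1).2 + (ins + 1 + 1)
          simp only [List.length_append, List.length_cons, List.length_nil, hlen2, hs2]; omega
        · show (fillB vals q2 out1 s1).2 ≤ vals.length
          rw [hs2]; omega
        · show ((fillB vals q2 out1 s1).1 ++ [none]).length ≤ 2 * (i + 1) + 1
          simp only [List.length_append, List.length_cons, List.length_nil, hlen2]; omega
      · have hA2 : ¬ ((2 * (i:Int) + 2) < ((out1 ++ vals.drop s1).length : Int)) := by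
          rw [hres1len]; push_cast; omega
        rw [if_neg hA2]
        rw [stepB_neg vals vals.length out1 s1 (ins + 1) q2 hg2]
        refine ⟨rfl, hl1, hs1le, ?_⟩
        show out1.length ≤ 2 * (i + 1) + 1
        omega
    · -- first guard false on both sides; second then false too
      have hA1 : ¬ ((2 * (i:Int) + 1) < (res.length : Int)) := by
        rw [hreslen]; push_cast; omega
      rw [if_neg hA1]
      have hA2 : ¬ ((2 * (i:Int) + 2) < (res.length : Int)) := by
        rw [hreslen]; push_cast; omega
      rw [if_neg hA2]
      rw [stepB_neg vals vals.length out s ins q1 hg1]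
      rw [stepB_neg vals vals.length out s ins q2 (by omega)]
      refine ⟨hres, hl, hs, ?_⟩
      show out.length ≤ 2 * (i + 1) + 1
      omega
  · rw [if_neg hv, if_neg hv]
    refine ⟨hres, hl, hs, ?_⟩
    show out.length ≤ 2 * (i + 1) + 1
    omega

-- the two loops agree from any index i on, given the invariant
lemma loops_eq (vals : List (Option Int)) :
    ∀ (k i : Nat) (out : List (Option Int)) (s ins : Nat) (res : List (Option Int)),
      i + k = vals.length → InvAB vals out s ins i res →
      (PySem.List.pyRange (i : Int) (vals.length : Int) 1).foldl (stepA vals) res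
        = (let st := (List.range' i k).foldl (stepOuterB vals) (out, s, ins)
           st.1 ++ vals.drop st.2.1) := by
  intro k
  induction k with
  | zero =>
    intro i out s ins res hik hInv
    rw [PySem.List.pyRange_one_eq_nil (by omega)]
    simpa using hInv.1
  | succ k ih =>
    intro i out s ins res hik hInv
    have hi : i < vals.length := by omega
    rw [PySem.List.pyRange_one_cons (by exact_mod_cast hi), List.range'_succ]
    simp only [List.foldl_cons]
    have hstep := step_spec vals out s ins i res hInv
    have hcast : ((i : Int) + 1) = (((i + 1 : Nat)) : Int) := by push_cast; ring
    rw [hcast]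
    exact ih (i + 1)
      (stepOuterB vals (out, s, ins) i).1
      (stepOuterB vals (out, s, ins) i).2.1
      (stepOuterB vals (out, s, ins) i).2.2
      (stepA vals res (i : Int)) (by omega) hstep

-- ===== VERDICT (by name: the statement is the Claim_ definition above) =====
theorem normalize_vals_spec : Claim_equal_normalize_vals := by
  intro vals _
  unfold Spec_normalize_vals normalize_vals normalize_vals_alt
  by_cases h : vals = [] ∨ PySem.List.pyGetD vals 0 (some 0) = none
  · rw [if_pos h, if_pos h]
  · rw [if_neg h, if_neg h]
    have h0 : (0 : Int) = ((0 : Nat) : Int) := rfl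
    rw [List.range_eq_range', h0]
    exact loops_eq vals vals.length 0 [] 0 0 vals (by omega)
      ⟨by simp, rfl, by omega, by simp⟩
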